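-- pv_equiv track=rewrite | github.com/francescopioscognamiglio/pythonExercises | exercises/getChildrenKeysOfSearchBinaryTreeImplementedViaPointersAndArray.py | getChildrenKeysViaArrayIterative
-- ===== SOURCE A (Python) =====
-- def getChildrenKeysViaArrayIterative(A, key):
--     i = 0
--     while i < len(A):
--         if A[i] == key:
--             if 2*i+1 < len(A) and 2*i+2 < len(A): return A[2*i+1], A[2*i+2]
--             elif 2*i+1 < len(A): return A[2*i+1], None
--             elif 2*i+2 < len(A): return None, A[2*i+2]
--             else: return None, None
--         if key > A[i]: i = 2*i+2
--         else: i = 2*i+1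
--     return None, None # no key found
-- ===== SOURCE B (Python) =====
-- def getChildrenKeysViaArrayIterative(A, key):
--     def child(j):
--         return A[j] if j < len(A) else None
--
--     def descend(i):
--         if i >= len(A):
--             return (None, None)
--         if A[i] == key:
--             return (child(2*i+1), child(2*i+2))
--         return descend(2*i+2) if key > A[i] else descend(2*i+1)
--
--     return descend(0)
-- ===== Notes on version B (the rewrite author's own statement) =====
-- stated objective: simpler
-- what changed: The while-loop with a four-way chain of child-presence branches is replaced by a recursive descent that returns the pair of two independent optional-child lookups via one helper.
import Mathlib
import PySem

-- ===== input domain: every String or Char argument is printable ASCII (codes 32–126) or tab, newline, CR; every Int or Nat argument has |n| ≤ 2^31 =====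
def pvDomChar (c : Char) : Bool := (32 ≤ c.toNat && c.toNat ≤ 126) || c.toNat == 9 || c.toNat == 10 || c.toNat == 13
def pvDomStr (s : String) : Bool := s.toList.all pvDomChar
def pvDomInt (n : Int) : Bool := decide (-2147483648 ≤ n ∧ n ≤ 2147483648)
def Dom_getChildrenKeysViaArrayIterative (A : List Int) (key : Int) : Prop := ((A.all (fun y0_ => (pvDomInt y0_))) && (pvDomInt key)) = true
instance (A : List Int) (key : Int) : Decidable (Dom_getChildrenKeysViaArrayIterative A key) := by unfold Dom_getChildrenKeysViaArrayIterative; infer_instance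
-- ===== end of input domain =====

-- B replaces the while-loop and four-way child-branch chain by a recursive descent returning two independent optional child lookups (objective: simpler).


-- ===== PORT A =====
-- getChildrenKeysViaArrayIterative: A's while-loop as the obvious recursion on the index (measure A.length - i)
def goA (A : List Int) (key : Int) (i : Nat) : Option Int × Option Int :=
  if h : i < A.length then
    if A.getD i 0 = key then
      if 2*i+1 < A.length ∧ 2*i+2 < A.length then (some (A.getD (2*i+1) 0), some (A.getD (2*i+2) 0))
      else if 2*i+1 < A.length then (some (A.getD (2*i+1) 0), none)
      else if 2*i+2 < A.length then (none, some (A.getD (2*i+2) 0))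
      else (none, none)
    else if key > A.getD i 0 then goA A key (2*i+2)
    else goA A key (2*i+1)
  else (none, none)
termination_by A.length - i
decreasing_by all_goals omega

def getChildrenKeysViaArrayIterative (A : List Int) (key : Int) : Option Int × Option Int :=
  goA A key 0

-- ===== PORT B =====
-- B: child j = A[j] if in range else None; recursive descend
def childB (A : List Int) (j : Nat) : Option Int :=
  if j < A.length then some (A.getD j 0) else none

def descendB (A : List Int) (key : Int) (i : Nat) : Option Int × Option Int :=
  if h : i ≥ A.length then (none, none)
  else if A.getD i 0 = key then (childB A (2*i+1), childB A (2*i+2))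
  else if key > A.getD i 0 then descendB A key (2*i+2)
  else descendB A key (2*i+1)
termination_by A.length - i
decreasing_by all_goals omega

def getChildrenKeysViaArrayIterative_alt (A : List Int) (key : Int) : Option Int × Option Int :=
  descendB A key 0

-- ===== PRECONDITION & SPEC =====
def Spec_getChildrenKeysViaArrayIterative (A : List Int) (key : Int) (out : Option Int × Option Int) : Prop := out = getChildrenKeysViaArrayIterative_alt A key
instance (A : List Int) (key : Int) (out : Option Int × Option Int) : Decidable (Spec_getChildrenKeysViaArrayIterative A key out) := by unfold Spec_getChildrenKeysViaArrayIterative; infer_instance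

-- ===== CLAIM (what is proved, stated in full; the proofs are below) =====
def Claim_equal_getChildrenKeysViaArrayIterative : Prop := ∀ (A : List Int) (key : Int), Dom_getChildrenKeysViaArrayIterative A key → Spec_getChildrenKeysViaArrayIterative A key (getChildrenKeysViaArrayIterative A key)

-- ===== LEMMAS AND PROOFS =====
theorem goA_eq_descendB (A : List Int) (key : Int) (i : Nat) :
    goA A key i = descendB A key i := by
  rw [goA, descendB]
  by_cases h : i < A.length
  · simp only [h, dite_true, show ¬ (i ≥ A.length) by omega, dite_false]
    by_cases hv : A.getD i 0 = key
    · simp only [hv, if_true, childB]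
      split_ifs <;> simp_all
    · by_cases hk : key > A.getD i 0
      · simp only [hv, if_false, hk, if_true, goA_eq_descendB A key (2*i+2)]
      · simp only [hv, if_false, hk, goA_eq_descendB A key (2*i+1)]
  · simp only [h, dite_false, show i ≥ A.length by omega, dite_true]
termination_by A.length - i
decreasing_by all_goals omega

-- ===== VERDICT (by name: the statement is the Claim_ definition above) =====
theorem getChildrenKeysViaArrayIterative_spec : Claim_equal_getChildrenKeysViaArrayIterative := by
  intro A key _
  unfold Spec_getChildrenKeysViaArrayIterative getChildrenKeysViaArrayIterative getChildrenKeysViaArrayIterative_alt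
  exact goA_eq_descendB A key 0
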